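-- pv_equiv track=rewrite | github.com/humblef00ls/PokerData | pe_lib.py | prGrid_diagDL
-- ===== SOURCE A (Python) =====
-- def prGrid_diagDL(r,c,grid):
-- 	maxProd = 0
-- 	for i in range(0,r-3):
-- 		for j in range(3,c):
-- 			prod = grid[i][j] * grid[i+1][j-1] * grid[i+2][j-2] * grid[i+3][j-3]
-- 			# str = grid[i][j], grid[i+1][j+1], grid[i+2][j+2], grid[i+3][j+3], prod
-- 			# print str
-- 			if prod > maxProd:
-- 				maxProd = prod
-- 	return maxProd
-- ===== SOURCE B (Python) =====
-- def prGrid_diagDL(r, c, grid):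
--     if r < 4 or c < 4:
--         return 0    # no 4-cell window fits
--     maxProd = 0
--     # anti-diagonal decomposition: s = i + j is constant along each down-left diagonal
--     for s in range(3, r + c - 4):
--         lo = max(0, s - (c - 1))      # smallest window-start row on this diagonal
--         hi = min(r - 4, s - 3)        # largest window-start row on this diagonal
--         if lo > hi:
--             continue
--         diag = [grid[i][s - i] for i in range(lo, hi + 4)]
--         for k in range(len(diag) - 3):
--             p = diag[k] * diag[k + 1] * diag[k + 2] * diag[k + 3]
--             if p > maxProd:
--                 maxProd = p
--     return maxProd
-- ===== Notes on version B (the rewrite author's own statement) =====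
-- stated objective: alternative
-- what changed: B regroups the 4-cell windows by anti-diagonal (constant i+j): it materialises each down-left diagonal as a list and slides a 4-wide window along it, instead of A's row-major double loop over window-start cells.
import Mathlib
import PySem

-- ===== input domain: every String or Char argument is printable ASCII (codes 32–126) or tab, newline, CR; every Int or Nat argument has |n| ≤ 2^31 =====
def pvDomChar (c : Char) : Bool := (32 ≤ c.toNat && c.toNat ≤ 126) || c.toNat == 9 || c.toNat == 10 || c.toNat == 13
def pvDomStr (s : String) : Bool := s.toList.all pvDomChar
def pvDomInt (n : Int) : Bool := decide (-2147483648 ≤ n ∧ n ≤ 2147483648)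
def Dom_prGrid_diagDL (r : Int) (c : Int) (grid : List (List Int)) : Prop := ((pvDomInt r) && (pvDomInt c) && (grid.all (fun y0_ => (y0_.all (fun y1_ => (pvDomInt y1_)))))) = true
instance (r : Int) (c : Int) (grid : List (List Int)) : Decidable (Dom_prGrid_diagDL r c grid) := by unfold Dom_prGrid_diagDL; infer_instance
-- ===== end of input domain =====

-- B re-groups the same 4-cell down-left windows by anti-diagonal (constant i+j) and slides a
-- 4-wide window along each diagonal list; objective: alternative decomposition, same values.

-- ===== PORT A =====
def prGrid_diagDL (r : Int) (c : Int) (grid : List (List Int)) : Int :=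
  (PySem.List.pyRange 0 (r - 3) 1).foldl (fun maxProd i =>
    (PySem.List.pyRange 3 c 1).foldl (fun maxProd j =>
      let prod :=
        PySem.List.pyGetD (PySem.List.pyGetD grid i []) j 0 *
        PySem.List.pyGetD (PySem.List.pyGetD grid (i + 1) []) (j - 1) 0 *
        PySem.List.pyGetD (PySem.List.pyGetD grid (i + 2) []) (j - 2) 0 *
        PySem.List.pyGetD (PySem.List.pyGetD grid (i + 3) []) (j - 3) 0
      if prod > maxProd then prod else maxProd) maxProd) 0

-- ===== PORT B =====
def prGrid_diagDL_alt (r : Int) (c : Int) (grid : List (List Int)) : Int :=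
  if r < 4 ∨ c < 4 then 0 else
  (PySem.List.pyRange 3 (r + c - 4) 1).foldl (fun maxProd s =>
    let lo := max 0 (s - (c - 1))
    let hi := min (r - 4) (s - 3)
    if lo > hi then maxProd
    else
      let diag := (PySem.List.pyRange lo (hi + 4) 1).map
        (fun i => PySem.List.pyGetD (PySem.List.pyGetD grid i []) (s - i) 0)
      (PySem.List.pyRange 0 ((diag.length : Int) - 3) 1).foldl (fun maxProd k =>
        let p :=
          PySem.List.pyGetD diag k 0 * PySem.List.pyGetD diag (k + 1) 0 *
          PySem.List.pyGetD diag (k + 2) 0 * PySem.List.pyGetD diag (k + 3) 0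
        if p > maxProd then p else maxProd) maxProd) 0

-- ===== PRECONDITION & SPEC =====
-- Pre_ excludes exactly the inputs where the Python A raises IndexError: when both loops are
-- nonempty (4 ≤ r and 4 ≤ c) it demands every accessed cell exist — rows 0..r-1 present and
-- row k long enough for the columns the diagonals touch in it.
def Pre_prGrid_diagDL (r : Int) (c : Int) (grid : List (List Int)) : Prop :=
  4 ≤ r → 4 ≤ c →
    (r ≤ (grid.length : Int) ∧
     ∀ k ∈ PySem.List.pyRange 0 r 1,
       c - max 0 (k - (r - 4)) ≤ ((PySem.List.pyGetD grid k []).length : Int))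
instance (r : Int) (c : Int) (grid : List (List Int)) : Decidable (Pre_prGrid_diagDL r c grid) := by
  unfold Pre_prGrid_diagDL; infer_instance

def pvWitness_prGrid_diagDL : Int × Int × List (List Int) :=
  (4, 4, [[1, 2, 3, 4], [5, 6, 7, 8], [9, 10, 11, 12], [13, 14, 15, 16]])

def Spec_prGrid_diagDL (r : Int) (c : Int) (grid : List (List Int)) (out : Int) : Prop := out = prGrid_diagDL_alt r c grid
instance (r : Int) (c : Int) (grid : List (List Int)) (out : Int) : Decidable (Spec_prGrid_diagDL r c grid out) := by unfold Spec_prGrid_diagDL; infer_instance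

-- ===== CLAIM (what is proved, stated in full; the proofs are below) =====
def Claim_equal_prGrid_diagDL : Prop := ∀ (r : Int) (c : Int) (grid : List (List Int)), Dom_prGrid_diagDL r c grid → Pre_prGrid_diagDL r c grid → Spec_prGrid_diagDL r c grid (prGrid_diagDL r c grid)

-- ===== LEMMAS AND PROOFS =====

-- the product of the 4-cell down-left window starting at cell p (out-of-range cells read 0)
def pvF (grid : List (List Int)) (p : Int × Int) : Int :=
  PySem.List.pyGetD (PySem.List.pyGetD grid p.1 []) p.2 0 *
  PySem.List.pyGetD (PySem.List.pyGetD grid (p.1 + 1) []) (p.2 - 1) 0 *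
  PySem.List.pyGetD (PySem.List.pyGetD grid (p.1 + 2) []) (p.2 - 2) 0 *
  PySem.List.pyGetD (PySem.List.pyGetD grid (p.1 + 3) []) (p.2 - 3) 0

-- window-start positions in A's (row-major) order
def pvPairsA (r c : Int) : List (Int × Int) :=
  (PySem.List.pyRange 0 (r - 3) 1).flatMap (fun i => (PySem.List.pyRange 3 c 1).map (fun j => (i, j)))

-- window-start positions on the anti-diagonal i + j = s, in B's order
def pvBlock (r c s : Int) : List (Int × Int) :=
  if max 0 (s - (c - 1)) > min (r - 4) (s - 3) then []
  else (PySem.List.pyRange 0 (min (r - 4) (s - 3) - max 0 (s - (c - 1)) + 1) 1).map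
        (fun k => (max 0 (s - (c - 1)) + k, s - max 0 (s - (c - 1)) - k))

def pvPairsB (r c : Int) : List (Int × Int) :=
  (PySem.List.pyRange 3 (r + c - 4) 1).flatMap (pvBlock r c)

theorem pv_ifgt (m p : Int) : (if p > m then p else m) = max m p := by
  rw [max_def]; split_ifs <;> omega

theorem pv_foldl_max_perm {l₁ l₂ : List Int} (h : l₁.Perm l₂) :
    ∀ b : Int, l₁.foldl max b = l₂.foldl max b := by
  induction h with
  | nil => intro b; rfl
  | cons x _ ih => intro b; simpa using ih (max b x)
  | swap x y l => intro b; simp [List.foldl, max_right_comm]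
  | trans _ _ ih₁ ih₂ => intro b; rw [ih₁, ih₂]

theorem pv_foldl_flatMap_max {α : Type} (g : α → List Int) (l : List α) (b : Int) :
    (l.flatMap g).foldl max b = l.foldl (fun m i => (g i).foldl max m) b := by
  induction l generalizing b with
  | nil => rfl
  | cons x t ih => simp [List.flatMap_cons, List.foldl_append, ih]

theorem pv_diag_get (f : Int → Int) (lo b m : Int) (h0 : 0 ≤ m) (h1 : m < b - lo) :
    PySem.List.pyGetD ((PySem.List.pyRange lo b 1).map f) m 0 = f (lo + m) := by
  rw [PySem.List.pyGetD_eq_getElem _ 0 h0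
      (by rw [List.length_map, PySem.List.length_pyRange_one]; omega)]
  simp [PySem.List.getElem_pyRange_one, Int.toNat_of_nonneg h0]

theorem pv_A_eq (r c : Int) (grid : List (List Int)) :
    prGrid_diagDL r c grid = ((pvPairsA r c).map (pvF grid)).foldl max 0 := by
  unfold prGrid_diagDL pvPairsA
  rw [List.map_flatMap, pv_foldl_flatMap_max]
  apply PySem.List.foldl_congr_mem
  intro acc i _
  rw [List.map_map, List.foldl_map]
  apply PySem.List.foldl_congr_mem
  intro m j _
  simp [pvF, pv_ifgt]

theorem pv_B_eq (r c : Int) (grid : List (List Int)) :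
    prGrid_diagDL_alt r c grid = ((pvPairsB r c).map (pvF grid)).foldl max 0 := by
  by_cases hrc : r < 4 ∨ c < 4
  · have hB : pvPairsB r c = [] := by
      unfold pvPairsB
      rw [List.flatMap_eq_nil_iff]
      intro s _
      unfold pvBlock
      rw [if_pos (by omega)]
    unfold prGrid_diagDL_alt
    rw [if_pos hrc, hB]
    rfl
  · unfold prGrid_diagDL_alt pvPairsB
    rw [if_neg hrc]
    rw [List.map_flatMap, pv_foldl_flatMap_max]
    apply PySem.List.foldl_congr_mem
    intro acc s _
    simp only [pvBlock]
    split_ifs with h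
    · simp
    · rw [List.map_map, List.foldl_map]
      have hlen : (((PySem.List.pyRange (max 0 (s - (c - 1))) (min (r - 4) (s - 3) + 4) 1).map
          (fun i => PySem.List.pyGetD (PySem.List.pyGetD grid i []) (s - i) 0)).length : Int) - 3
          = min (r - 4) (s - 3) - max 0 (s - (c - 1)) + 1 := by
        simp [PySem.List.length_pyRange_one]; omega
      rw [hlen]
      apply PySem.List.foldl_congr_mem
      intro m k hk
      rw [PySem.List.mem_pyRange_one] at hk
      rw [pv_diag_get _ _ _ k (by omega) (by omega),
          pv_diag_get _ _ _ (k + 1) (by omega) (by omega),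
          pv_diag_get _ _ _ (k + 2) (by omega) (by omega),
          pv_diag_get _ _ _ (k + 3) (by omega) (by omega)]
      simp only [Function.comp_apply, pvF, pv_ifgt]
      have e1 : max 0 (s - (c - 1)) + (k + 1) = max 0 (s - (c - 1)) + k + 1 := by ring
      have e2 : max 0 (s - (c - 1)) + (k + 2) = max 0 (s - (c - 1)) + k + 2 := by ring
      have e3 : max 0 (s - (c - 1)) + (k + 3) = max 0 (s - (c - 1)) + k + 3 := by ring
      have f0 : s - (max 0 (s - (c - 1)) + k) = s - max 0 (s - (c - 1)) - k := by ring
      have g1 : s - (max 0 (s - (c - 1)) + k + 1) = s - max 0 (s - (c - 1)) - k - 1 := by ring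
      have g2 : s - (max 0 (s - (c - 1)) + k + 2) = s - max 0 (s - (c - 1)) - k - 2 := by ring
      have g3 : s - (max 0 (s - (c - 1)) + k + 3) = s - max 0 (s - (c - 1)) - k - 3 := by ring
      rw [e1, e2, e3, f0, g1, g2, g3]
theorem pv_mem_block_sum (r c s : Int) {p : Int × Int} (h : p ∈ pvBlock r c s) :
    p.1 + p.2 = s := by
  unfold pvBlock at h
  split_ifs at h
  · simp at h
  · obtain ⟨k, _, rfl⟩ := List.mem_map.1 h
    simp

theorem pv_nodup_pairsA (r c : Int) : (pvPairsA r c).Nodup := by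
  have : pvPairsA r c = (PySem.List.pyRange 0 (r - 3) 1) ×ˢ (PySem.List.pyRange 3 c 1) := rfl
  rw [this]
  exact List.Nodup.product (PySem.List.nodup_pyRange_one _ _) (PySem.List.nodup_pyRange_one _ _)

theorem pv_nodup_pairsB (r c : Int) : (pvPairsB r c).Nodup := by
  unfold pvPairsB
  refine List.nodup_flatMap.2 ⟨?_, ?_⟩
  · intro s _
    unfold pvBlock
    split_ifs
    · exact List.nodup_nil
    · refine List.Nodup.map ?_ (PySem.List.nodup_pyRange_one _ _)
      intro a b hab
      have := congrArg Prod.fst hab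
      simpa using this
  · refine (PySem.List.pairwise_lt_pyRange_one _ _).imp ?_
    intro s₁ s₂ hlt p h₁ h₂
    have := pv_mem_block_sum r c s₁ h₁
    have := pv_mem_block_sum r c s₂ h₂
    omega

theorem pv_mem_pairs (r c : Int) (p : Int × Int) : p ∈ pvPairsA r c ↔ p ∈ pvPairsB r c := by
  obtain ⟨i, j⟩ := p
  unfold pvPairsA pvPairsB pvBlock
  simp only [List.mem_flatMap, List.mem_map, PySem.List.mem_pyRange_one, Prod.mk.injEq]
  constructor
  · rintro ⟨i', hi, j', hj, hij⟩
    obtain ⟨hi', hj'⟩ := hij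
    refine ⟨i + j, by omega, ?_⟩
    rw [if_neg (by omega)]
    refine List.mem_map.2 ⟨i - max 0 (i + j - (c - 1)),
      by rw [PySem.List.mem_pyRange_one]; omega, ?_⟩
    rw [Prod.mk.injEq]
    omega
  · rintro ⟨s, hs, hmem⟩
    split_ifs at hmem with h
    · simp at hmem
    · obtain ⟨k, hkmem, heq⟩ := List.mem_map.1 hmem
      rw [PySem.List.mem_pyRange_one] at hkmem
      have h1 := congrArg Prod.fst heq
      have h2 := congrArg Prod.snd heq
      simp only at h1 h2
      exact ⟨i, by omega, j, by omega, rfl, rfl⟩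

theorem pv_perm (r c : Int) : (pvPairsA r c).Perm (pvPairsB r c) :=
  (List.perm_ext_iff_of_nodup (pv_nodup_pairsA r c) (pv_nodup_pairsB r c)).2 (pv_mem_pairs r c)

-- ===== VERDICT (by name: the statement is the Claim_ definition above) =====
theorem prGrid_diagDL_spec : Claim_equal_prGrid_diagDL := by
  intro r c grid _ _
  unfold Spec_prGrid_diagDL
  rw [pv_A_eq, pv_B_eq]
  exact pv_foldl_max_perm ((pv_perm r c).map (pvF grid)) 0
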